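-- pv_equiv track=rewrite | github.com/ying1216/-QA- | 均一題目1、2.py | count_num
-- ===== SOURCE A (Python) =====
-- def count_num(num):
--     list = []
--     for i in range(1, num+1):
--         if i % 15 == 0:
--             list.append(i)
--         else:
--             if i % 3 == 0 or i % 5 == 0:
--                 continue
--             else:
--                 list.append(i)
--     return len(list)
-- ===== SOURCE B (Python) =====
-- def count_num(num):
--     n = num if num > 0 else 0
--     return n - n // 3 - n // 5 + 2 * (n // 15)
-- ===== Notes on version B (the rewrite author's own statement) =====
-- stated objective: faster
-- what changed: Replaces the linear loop that builds a list of counted numbers with a constant-time closed-form inclusion-exclusion count using floor divisions.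
import Mathlib
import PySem

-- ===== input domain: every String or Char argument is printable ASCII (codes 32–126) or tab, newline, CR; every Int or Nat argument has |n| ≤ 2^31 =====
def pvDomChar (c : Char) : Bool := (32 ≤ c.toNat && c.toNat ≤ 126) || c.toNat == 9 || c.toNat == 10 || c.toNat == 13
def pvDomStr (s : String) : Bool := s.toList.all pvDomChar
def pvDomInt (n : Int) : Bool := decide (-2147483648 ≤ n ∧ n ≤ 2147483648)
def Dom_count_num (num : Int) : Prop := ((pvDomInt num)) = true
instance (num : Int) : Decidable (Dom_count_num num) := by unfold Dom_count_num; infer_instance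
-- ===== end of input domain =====

-- B replaces A's O(n) list-building loop with a closed-form inclusion-exclusion count (objective: faster).

-- ===== PORT A =====
def count_num (num : Int) : Int :=
  ((PySem.List.pyRange 1 (num + 1) 1).foldl
    (fun lst i =>
      if PySem.Int.mod i 15 = 0 then lst ++ [i]
      else if PySem.Int.mod i 3 = 0 ∨ PySem.Int.mod i 5 = 0 then lst
      else lst ++ [i]) ([] : List Int)).length

-- ===== PORT B =====
def count_num_alt (num : Int) : Int :=
  let n : Int := if num > 0 then num else 0
  n - PySem.Int.floordiv n 3 - PySem.Int.floordiv n 5 + 2 * PySem.Int.floordiv n 15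

-- ===== PRECONDITION & SPEC =====
def Spec_count_num (num : Int) (out : Int) : Prop := out = count_num_alt num
instance (num : Int) (out : Int) : Decidable (Spec_count_num num out) := by unfold Spec_count_num; infer_instance

-- ===== CLAIM (what is proved, stated in full; the proofs are below) =====
def Claim_equal_count_num : Prop := ∀ (num : Int), Dom_count_num num → Spec_count_num num (count_num num)

-- ===== LEMMAS AND PROOFS =====

theorem count_num_nonpos (num : Int) (h : num ≤ 0) : count_num num = 0 := by
  unfold count_num
  rw [PySem.List.pyRange_one_eq_nil (show num + 1 ≤ 1 by omega)]
  rfl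

theorem count_num_alt_nonpos (num : Int) (h : num ≤ 0) : count_num_alt num = 0 := by
  unfold count_num_alt
  rw [if_neg (by omega)]
  decide

theorem count_num_alt_pos (num : Int) (h : 0 < num) :
    count_num_alt num = num - num / 3 - num / 5 + 2 * (num / 15) := by
  unfold count_num_alt
  rw [if_pos (by omega)]
  show num - PySem.Int.floordiv num 3 - PySem.Int.floordiv num 5 + 2 * PySem.Int.floordiv num 15 = _
  rw [PySem.Int.floordiv_eq_ediv_of_pos (show (0:Int) < 3 by norm_num),
      PySem.Int.floordiv_eq_ediv_of_pos (show (0:Int) < 5 by norm_num),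
      PySem.Int.floordiv_eq_ediv_of_pos (show (0:Int) < 15 by norm_num)]

theorem sd3 (b : Int) : (b+1)/3 = b/3 + (if (b+1) % 3 = 0 then 1 else 0) := by
  split_ifs <;> omega

theorem sd5 (b : Int) : (b+1)/5 = b/5 + (if (b+1) % 5 = 0 then 1 else 0) := by
  split_ifs <;> omega

theorem sd15 (b : Int) : (b+1)/15 = b/15 + (if (b+1) % 15 = 0 then 1 else 0) := by
  split_ifs <;> omega

theorem count_num_succ (b : Int) (h : 0 ≤ b) :
    count_num (b + 1) = count_num b +
      (if PySem.Int.mod (b + 1) 15 = 0 then 1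
       else if PySem.Int.mod (b + 1) 3 = 0 ∨ PySem.Int.mod (b + 1) 5 = 0 then 0 else 1) := by
  unfold count_num
  rw [PySem.List.pyRange_one_succ_right (show (1:Int) ≤ b + 1 by omega), List.foldl_append]
  simp only [List.foldl]
  split_ifs with h1 h2 <;> simp

theorem count_num_alt_succ (b : Int) (h : 0 ≤ b) :
    count_num_alt (b + 1) = count_num_alt b +
      (if PySem.Int.mod (b + 1) 15 = 0 then 1
       else if PySem.Int.mod (b + 1) 3 = 0 ∨ PySem.Int.mod (b + 1) 5 = 0 then 0 else 1) := by
  simp only [PySem.Int.mod_eq_emod_of_pos (show (0:Int) < 3 by norm_num),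
    PySem.Int.mod_eq_emod_of_pos (show (0:Int) < 5 by norm_num),
    PySem.Int.mod_eq_emod_of_pos (show (0:Int) < 15 by norm_num)]
  rcases eq_or_lt_of_le h with hb | hb
  · rw [← hb]; decide
  · rw [count_num_alt_pos (b + 1) (by omega), count_num_alt_pos b hb,
        sd3, sd5, sd15]
    split_ifs <;> omega

theorem count_num_eq_alt (num : Int) : count_num num = count_num_alt num := by
  by_cases h : num ≤ 0
  · rw [count_num_nonpos num h, count_num_alt_nonpos num h]
  · obtain ⟨n, rfl⟩ : ∃ n : Nat, num = (n : Int) :=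
      ⟨num.toNat, (Int.toNat_of_nonneg (by omega)).symm⟩
    induction n with
    | zero => decide
    | succ m ih =>
      rcases Nat.eq_zero_or_pos m with hm | hm
      · subst hm; decide
      · have hstep := count_num_succ (m : Int) (by positivity)
        have hstep' := count_num_alt_succ (m : Int) (by positivity)
        push_cast
        push_cast at hstep hstep'
        rw [hstep, hstep', ih (by omega)]

-- ===== VERDICT (by name: the statement is the Claim_ definition above) =====
theorem count_num_spec : Claim_equal_count_num := by
  intro num _
  unfold Spec_count_num
  exact count_num_eq_alt num
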